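-- pv_equiv track=rewrite | github.com/morzan1001/Dependency-Control | backend/app/api/v1/helpers/analytics.py | build_findings_severity_map
-- ===== SOURCE A (Python) =====
-- from typing import Any, Dict, List, Optional, Tuple
--
-- def build_findings_severity_map(
--     findings: List[Dict[str, Any]],
-- ) -> Dict[str, Dict[str, int]]:
--     """
--     Build a map of component names to their severity counts.
--
--     Args:
--         findings: List of finding documents
--
--     Returns:
--         Dict mapping component name to severity counts:
--         {
--             "lodash": {"critical": 1, "high": 2, "medium": 0, "low": 0, "total": 3},
--             ...
--         }
--     """
--     findings_map: Dict[str, Dict[str, int]] = {}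
--
--     for finding in findings:
--         component = finding.get("component")
--         if not component:
--             continue
--
--         severity = finding.get("severity", "UNKNOWN")
--
--         if component not in findings_map:
--             findings_map[component] = {
--                 "critical": 0,
--                 "high": 0,
--                 "medium": 0,
--                 "low": 0,
--                 "total": 0,
--             }
--
--         sev_lower = severity.lower()
--         if sev_lower in findings_map[component]:
--             findings_map[component][sev_lower] += 1
--         findings_map[component]["total"] += 1
--
--     return findings_map
-- ===== SOURCE B (Python) =====
-- def build_findings_severity_map(findings):
--     # Pass 1: group raw severity values by component (same skip/default rules as A).
--     groups = {}
--     for finding in findings: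
--         component = finding.get("component")
--         if not component:
--             continue
--         groups.setdefault(component, []).append(finding.get("severity", "UNKNOWN"))
--     # Pass 2: count each component's severities into the fixed dict.
--     result = {}
--     for component, severities in groups.items():
--         counts = {"critical": 0, "high": 0, "medium": 0, "low": 0, "total": 0}
--         for severity in severities:
--             sev_lower = severity.lower()
--             if sev_lower in counts:
--                 counts[sev_lower] += 1
--             counts["total"] += 1
--         result[component] = counts
--     return result
-- ===== Notes on version B (the rewrite author's own statement) =====
-- stated objective: alternative
-- what changed: A's single interleaved loop (create-or-update severity counts per finding) is replaced by a two-pass build-index-then-count shape: first group each component's raw severity strings into a dict of lists, then count each group into the fixed {critical,high,medium,low,total} dict.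
import Mathlib
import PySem

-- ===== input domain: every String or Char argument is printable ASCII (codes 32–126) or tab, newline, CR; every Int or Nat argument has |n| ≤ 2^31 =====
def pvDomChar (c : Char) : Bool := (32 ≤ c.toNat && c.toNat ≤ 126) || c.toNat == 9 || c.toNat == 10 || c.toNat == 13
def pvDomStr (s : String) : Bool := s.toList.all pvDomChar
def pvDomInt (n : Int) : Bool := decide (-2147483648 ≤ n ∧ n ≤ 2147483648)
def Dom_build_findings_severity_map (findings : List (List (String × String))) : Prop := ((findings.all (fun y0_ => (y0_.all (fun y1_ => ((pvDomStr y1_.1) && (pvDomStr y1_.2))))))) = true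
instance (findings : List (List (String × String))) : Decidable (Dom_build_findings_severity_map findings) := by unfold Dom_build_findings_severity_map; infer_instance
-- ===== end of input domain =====

-- B replaces A's single interleaved loop by a two-pass decomposition (group severities per
-- component, then count each group into the fixed counts dict); same return value, no speed claim.

-- finding.get(k)  (first-match lookup on the association list; shared plumbing of both ports)
def pyGetStr (finding : List (String × String)) (k : String) : Option String :=
  (finding.find? (fun p => p.1 == k)).map (·.2)

-- ===== PORT A =====
def build_findings_severity_map (findings : List (List (String × String))) : List (String × List (String × Int)) :=
  let findings_map : PySem.Dict String (PySem.Dict String Int) :=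
    findings.foldl (fun findings_map finding =>
      match pyGetStr finding "component" with
      | none => findings_map                         -- `if not component: continue` (missing)
      | some component =>
        if component = "" then findings_map          -- `if not component: continue` (empty string)
        else
          let severity := (pyGetStr finding "severity").getD "UNKNOWN"
          let findings_map :=
            if findings_map.contains component then findings_map
            else findings_map.insert component
              (PySem.Dict.ofList [("critical", 0), ("high", 0), ("medium", 0), ("low", 0), ("total", 0)])
          let sev_lower := PySem.Str.lower severity
          let findings_map :=
            if (findings_map.getD component PySem.Dict.empty).contains sev_lower then
              findings_map.modify component PySem.Dict.empty (fun d => d.modify sev_lower 0 (· + 1))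
            else findings_map
          findings_map.modify component PySem.Dict.empty (fun d => d.modify "total" 0 (· + 1)))
      PySem.Dict.empty
  findings_map.items.map (fun p => (p.1, p.2.items))

-- ===== PORT B =====
def build_findings_severity_map_alt (findings : List (List (String × String))) : List (String × List (String × Int)) :=
  -- pass 1: groups.setdefault(component, []).append(severity)  ≡  groups[component] = groups.get(component, []) + [severity]
  let groups : PySem.Dict String (List String) :=
    findings.foldl (fun groups finding =>
      match pyGetStr finding "component" with
      | none => groups
      | some component =>
        if component = "" then groups
        else groups.modify component [] (· ++ [(pyGetStr finding "severity").getD "UNKNOWN"]))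
      PySem.Dict.empty
  -- pass 2: count each group into the fixed counts dict
  let result : PySem.Dict String (PySem.Dict String Int) :=
    groups.items.foldl (fun result p =>
      let counts := p.2.foldl (fun counts severity =>
        let sev_lower := PySem.Str.lower severity
        let counts := if counts.contains sev_lower then counts.modify sev_lower 0 (· + 1) else counts
        counts.modify "total" 0 (· + 1))
        (PySem.Dict.ofList [("critical", 0), ("high", 0), ("medium", 0), ("low", 0), ("total", 0)])
      result.insert p.1 counts)
      PySem.Dict.empty
  result.items.map (fun p => (p.1, p.2.items))

-- ===== PRECONDITION & SPEC =====
def Spec_build_findings_severity_map (findings : List (List (String × String))) (out : List (String × List (String × Int))) : Prop := out = build_findings_severity_map_alt findings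
instance (findings : List (List (String × String))) (out : List (String × List (String × Int))) : Decidable (Spec_build_findings_severity_map findings out) := by unfold Spec_build_findings_severity_map; infer_instance

-- ===== CLAIM (what is proved, stated in full; the proofs are below) =====
def Claim_equal_build_findings_severity_map : Prop := ∀ (findings : List (List (String × String))), Dom_build_findings_severity_map findings → Spec_build_findings_severity_map findings (build_findings_severity_map findings)

-- ===== LEMMAS AND PROOFS =====

-- (component, severity) that a finding contributes, or none if it is skipped
def bfsInfo (finding : List (String × String)) : Option (String × String) :=
  match pyGetStr finding "component" with
  | none => none
  | some component =>
    if component = "" then none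
    else some (component, (pyGetStr finding "severity").getD "UNKNOWN")

def bfsInit : PySem.Dict String Int :=
  PySem.Dict.ofList [("critical", 0), ("high", 0), ("medium", 0), ("low", 0), ("total", 0)]

-- one counting step of B's inner loop
def bfsCStep (counts : PySem.Dict String Int) (severity : String) : PySem.Dict String Int :=
  let sev_lower := PySem.Str.lower severity
  let counts := if counts.contains sev_lower then counts.modify sev_lower 0 (· + 1) else counts
  counts.modify "total" 0 (· + 1)

def bfsCount (sevs : List String) : PySem.Dict String Int := sevs.foldl bfsCStep bfsInit

def bfsCountify (q : String × List String) : String × PySem.Dict String Int := (q.1, bfsCount q.2)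

def bfsMapCount (g : PySem.Dict String (List String)) : PySem.Dict String (PySem.Dict String Int) :=
  PySem.Dict.mk (g.items.map bfsCountify)

-- A's loop body on a contributing (component, severity) pair
def bfsACore (m : PySem.Dict String (PySem.Dict String Int)) (p : String × String) :
    PySem.Dict String (PySem.Dict String Int) :=
  let m1 := if m.contains p.1 then m else m.insert p.1 bfsInit
  let sev_lower := PySem.Str.lower p.2
  let m2 := if (m1.getD p.1 PySem.Dict.empty).contains sev_lower then
      m1.modify p.1 PySem.Dict.empty (fun d => d.modify sev_lower 0 (· + 1))
    else m1
  m2.modify p.1 PySem.Dict.empty (fun d => d.modify "total" 0 (· + 1))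

-- B's grouping step on a contributing pair
def bfsGCore (g : PySem.Dict String (List String)) (p : String × String) :
    PySem.Dict String (List String) :=
  g.modify p.1 [] (· ++ [p.2])

lemma bfsA_factor (findings : List (List (String × String)))
    (m : PySem.Dict String (PySem.Dict String Int)) :
    findings.foldl (fun findings_map finding =>
      match pyGetStr finding "component" with
      | none => findings_map
      | some component =>
        if component = "" then findings_map
        else
          let severity := (pyGetStr finding "severity").getD "UNKNOWN"
          let findings_map :=
            if findings_map.contains component then findings_map
            else findings_map.insert component
              (PySem.Dict.ofList [("critical", 0), ("high", 0), ("medium", 0), ("low", 0), ("total", 0)])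
          let sev_lower := PySem.Str.lower severity
          let findings_map :=
            if (findings_map.getD component PySem.Dict.empty).contains sev_lower then
              findings_map.modify component PySem.Dict.empty (fun d => d.modify sev_lower 0 (· + 1))
            else findings_map
          findings_map.modify component PySem.Dict.empty (fun d => d.modify "total" 0 (· + 1))) m
    = (findings.filterMap bfsInfo).foldl bfsACore m := by
  induction findings generalizing m with
  | nil => rfl
  | cons f fs ih =>
    simp only [List.foldl_cons, List.filterMap_cons]
    rw [ih]
    cases h : bfsInfo f with
    | none =>
      simp only
      congr 1
      unfold bfsInfo at h
      cases hcf : pyGetStr f "component" with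
      | none => rfl
      | some c =>
        rw [hcf] at h
        by_cases hc : c = ""
        · simp [hc]
        · simp [hc] at h
    | some p =>
      simp only [List.foldl_cons]
      congr 1
      unfold bfsInfo at h
      cases hcf : pyGetStr f "component" with
      | none => rw [hcf] at h; simp at h
      | some c =>
        rw [hcf] at h
        by_cases hc : c = ""
        · simp [hc] at h
        · simp only [hc, if_false] at h ⊢
          injection h with h
          subst h
          rfl

lemma bfsB_factor (findings : List (List (String × String)))
    (g : PySem.Dict String (List String)) :
    findings.foldl (fun groups finding =>
      match pyGetStr finding "component" with
      | none => groups
      | some component =>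
        if component = "" then groups
        else groups.modify component [] (· ++ [(pyGetStr finding "severity").getD "UNKNOWN"])) g
    = (findings.filterMap bfsInfo).foldl bfsGCore g := by
  induction findings generalizing g with
  | nil => rfl
  | cons f fs ih =>
    simp only [List.foldl_cons, List.filterMap_cons]
    rw [ih]
    cases h : bfsInfo f with
    | none =>
      simp only
      congr 1
      unfold bfsInfo at h
      cases hcf : pyGetStr f "component" with
      | none => rfl
      | some c =>
        rw [hcf] at h
        by_cases hc : c = ""
        · simp [hc]
        · simp [hc] at h
    | some p =>
      simp only [List.foldl_cons]
      congr 1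
      unfold bfsInfo at h
      cases hcf : pyGetStr f "component" with
      | none => rw [hcf] at h; simp at h
      | some c =>
        rw [hcf] at h
        by_cases hc : c = ""
        · simp [hc] at h
        · simp only [hc, if_false] at h ⊢
          injection h with h
          subst h
          rfl

lemma bfs_get?_mk_map (l : List (String × List String)) (k : String) :
    (PySem.Dict.mk (l.map bfsCountify)).get? k = ((PySem.Dict.mk l).get? k).map bfsCount := by
  induction l with
  | nil => rfl
  | cons a rest ih =>
    obtain ⟨k1, v1⟩ := a
    simp only [List.map_cons, bfsCountify]
    rw [PySem.Dict.get?_mk_cons, PySem.Dict.get?_mk_cons]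
    by_cases h : (k1 == k) = true <;> simp [h, ih]

lemma bfs_contains_mapCount (g : PySem.Dict String (List String)) (k : String) :
    (bfsMapCount g).contains k = g.contains k := by
  unfold bfsMapCount PySem.Dict.contains
  simp [List.any_map, Function.comp_def, bfsCountify]

lemma bfs_get?_mapCount (g : PySem.Dict String (List String)) (k : String) :
    (bfsMapCount g).get? k = (g.get? k).map bfsCount := by
  unfold bfsMapCount
  exact bfs_get?_mk_map g.items k

lemma bfs_getD_mapCount_of_contains (g : PySem.Dict String (List String)) (k : String)
    (h : g.contains k = true) :
    (bfsMapCount g).getD k PySem.Dict.empty = bfsCount (g.getD k []) := by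
  rw [PySem.Dict.contains_eq_isSome_get?] at h
  obtain ⟨xs, hxs⟩ := Option.isSome_iff_exists.mp h
  simp [PySem.Dict.getD, bfs_get?_mapCount, hxs]

lemma bfs_insert_mapCount (g : PySem.Dict String (List String)) (c : String) (X : List String) :
    (bfsMapCount g).insert c (bfsCount X) = bfsMapCount (g.insert c X) := by
  apply PySem.Dict.ext
  by_cases hc : g.contains c = true
  · rw [PySem.Dict.items_insert_of_contains _ _ (by rw [bfs_contains_mapCount]; exact hc),
        show (g.insert c X) = PySem.Dict.mk (g.items.map (fun p => if (p.1 == c) = true then (c, X) else p)) from by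
          apply PySem.Dict.ext; exact PySem.Dict.items_insert_of_contains _ _ hc]
    unfold bfsMapCount
    simp only [List.map_map]
    apply List.map_congr_left
    intro p _
    by_cases h : p.1 = c <;> simp [h, bfsCountify]
  · rw [PySem.Dict.items_insert_of_not_contains _ _ (by rw [bfs_contains_mapCount]; simpa using hc),
        show (g.insert c X) = PySem.Dict.mk (g.items ++ [(c, X)]) from by
          apply PySem.Dict.ext; exact PySem.Dict.items_insert_of_not_contains _ _ (by simpa using hc)]
    unfold bfsMapCount
    simp [bfsCountify]

lemma bfs_count_append (xs : List String) (s : String) :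
    bfsCount (xs ++ [s]) = bfsCStep (bfsCount xs) s := by
  unfold bfsCount
  rw [List.foldl_append]
  rfl

lemma bfs_acore_mapCount (g : PySem.Dict String (List String)) (p : String × String) :
    bfsACore (bfsMapCount g) p = (bfsMapCount g).insert p.1 (bfsCount (g.getD p.1 [] ++ [p.2])) := by
  unfold bfsACore
  rw [bfs_count_append]
  by_cases hc : g.contains p.1 = true
  · have hgd := bfs_getD_mapCount_of_contains g p.1 hc
    rw [show (bfsMapCount g).contains p.1 = true from by rw [bfs_contains_mapCount]; exact hc]
    unfold bfsCStep PySem.Dict.modify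
    simp only [if_true, hgd]
    by_cases hs : (bfsCount (g.getD p.1 [])).contains (PySem.Str.lower p.2) = true <;>
      simp only [hs, if_true, if_false, Bool.false_eq_true, hgd,
        PySem.Dict.getD_insert_self, PySem.Dict.insert_insert_self]
  · rw [show (bfsMapCount g).contains p.1 = false from by rw [bfs_contains_mapCount]; simpa using hc]
    rw [PySem.Dict.getD_of_not_contains g [] (by simpa using hc)]
    have hinit : bfsCount [] = bfsInit := rfl
    unfold bfsCStep PySem.Dict.modify
    simp only [Bool.false_eq_true, if_false, PySem.Dict.getD_insert_self, hinit]
    by_cases hs : bfsInit.contains (PySem.Str.lower p.2) = true <;>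
      simp only [hs, if_true, if_false, Bool.false_eq_true,
        PySem.Dict.getD_insert_self, PySem.Dict.insert_insert_self]

lemma bfs_main (l : List (String × String)) (g : PySem.Dict String (List String)) :
    l.foldl bfsACore (bfsMapCount g) = bfsMapCount (l.foldl bfsGCore g) := by
  induction l generalizing g with
  | nil => rfl
  | cons p rest ih =>
    simp only [List.foldl_cons]
    rw [bfs_acore_mapCount]
    rw [show bfsGCore g p = g.insert p.1 (g.getD p.1 [] ++ [p.2]) from rfl]
    rw [bfs_insert_mapCount]
    exact ih (g.insert p.1 (g.getD p.1 [] ++ [p.2]))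

lemma bfs_mapCount_empty :
    bfsMapCount PySem.Dict.empty = (PySem.Dict.empty : PySem.Dict String (PySem.Dict String Int)) := rfl

-- ===== VERDICT (by name: the statement is the Claim_ definition above) =====
theorem build_findings_severity_map_spec : Claim_equal_build_findings_severity_map := by
  intro findings _
  unfold Spec_build_findings_severity_map
  have hA : build_findings_severity_map findings
      = ((findings.filterMap bfsInfo).foldl bfsACore PySem.Dict.empty).items.map
          (fun p => (p.1, p.2.items)) := by
    unfold build_findings_severity_map
    rw [bfsA_factor]
  have hB : build_findings_severity_map_alt findings
      = (((findings.filterMap bfsInfo).foldl bfsGCore PySem.Dict.empty).items.foldl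
          (fun result p => result.insert p.1 (bfsCount p.2)) PySem.Dict.empty).items.map
          (fun p => (p.1, p.2.items)) := by
    unfold build_findings_severity_map_alt
    rw [bfsB_factor]
    rfl
  rw [hA, hB]
  set groups := (findings.filterMap bfsInfo).foldl bfsGCore PySem.Dict.empty with hg
  have hnodup : groups.keys.Nodup := by
    rw [hg]
    exact PySem.Dict.nodup_keys_foldl_modify_key (findings.filterMap bfsInfo) Prod.fst []
      (fun _ p l => l ++ [p.2]) PySem.Dict.empty (by simp [PySem.Dict.keys_empty])
  have hitems : (groups.items.foldl (fun result p => result.insert p.1 (bfsCount p.2))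
      PySem.Dict.empty).items = groups.items.map bfsCountify := by
    rw [PySem.Dict.items_foldl_insert_fresh groups.items Prod.fst (fun p => bfsCount p.2)
      PySem.Dict.empty (fun _ _ => PySem.Dict.contains_empty _) (by exact hnodup)]
    rfl
  rw [hitems]
  have hAmain : (findings.filterMap bfsInfo).foldl bfsACore PySem.Dict.empty = bfsMapCount groups := by
    rw [hg, ← bfs_mapCount_empty]
    exact bfs_main _ _
  rw [hAmain]
  rfl
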